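-- pv_equiv track=rewrite | github.com/hisorhikaneko92-create/itsai-detection | scripts/synthesize_late_seam.py | find_sentence_boundary_word_idx
-- ===== SOURCE A (Python) =====
-- from typing import List, Optional, Tuple
--
-- def find_sentence_boundary_word_idx(words: List[str],
--                                     start: int,
--                                     end: int) -> Optional[int]:
--     """Within words[start:end], find the index of the LAST word whose
--     rendered character ends with sentence-ending punctuation. Returns
--     the word index just AFTER that word (so it's a valid trim point),
--     or None if no sentence boundary exists in the range.
--     """
--     for i in range(end - 1, start - 1, -1):
--         # Strip trailing quotes/brackets to expose the punctuation
--         stripped = words[i].rstrip('"\')]')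
--         if stripped and stripped[-1] in '.!?':
--             return i + 1   # cut AFTER this word
--     return None
-- ===== SOURCE B (Python) =====
-- _TRAIL = '"\')]'
--
-- def _ends_sentence(word):
--     # scan the word from the right: skip trailing quotes/brackets,
--     # then test the first remaining character
--     for ch in reversed(word):
--         if ch in _TRAIL:
--             continue
--         return ch in '.!?'
--     return False
--
-- def find_sentence_boundary_word_idx(words, start, end):
--     last = None
--     for i in range(start, end):
--         if _ends_sentence(words[i]):
--             last = i + 1
--     return last
-- ===== Notes on version B (the rewrite author's own statement) =====
-- stated objective: alternative
-- what changed: B replaces A's backward index scan with early return by a single forward pass that keeps a 'last boundary seen' accumulator, and tests each word by scanning its characters from the right instead of building the rstrip'ed string.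
-- outside the precondition, e.g. on find_sentence_boundary_word_idx(['a.'], -5, 1): A returns 1, B raises IndexError
import Mathlib
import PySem

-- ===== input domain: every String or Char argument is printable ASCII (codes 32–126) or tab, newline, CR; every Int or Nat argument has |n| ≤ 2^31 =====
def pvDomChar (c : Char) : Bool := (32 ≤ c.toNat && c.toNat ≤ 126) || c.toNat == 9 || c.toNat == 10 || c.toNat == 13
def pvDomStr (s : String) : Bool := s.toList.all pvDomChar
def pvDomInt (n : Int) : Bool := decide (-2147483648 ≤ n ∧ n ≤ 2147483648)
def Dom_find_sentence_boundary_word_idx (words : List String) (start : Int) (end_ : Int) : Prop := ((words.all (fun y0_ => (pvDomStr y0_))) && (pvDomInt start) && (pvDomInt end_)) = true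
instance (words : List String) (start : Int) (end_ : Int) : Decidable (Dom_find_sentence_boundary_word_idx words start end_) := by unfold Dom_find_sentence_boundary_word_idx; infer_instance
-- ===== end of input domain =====

-- B replaces A's backward scan with early return by a forward pass keeping a 'last boundary' accumulator (alternative decomposition, same cost).


-- ===== PORT A =====
-- the char set '"\')]' of the rstrip call, and '.!?'
def pvTrail : List Char := ['"', '\'', ')', ']']
def pvPunct : List Char := ['.', '!', '?']

-- w.rstrip('"\')]') : drop the trailing characters of the set (exact on every string)
def pvRstripTrail (cs : List Char) : List Char :=
  (cs.reverse.dropWhile (fun c => decide (c ∈ pvTrail))).reverse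

-- the loop-body test of A: stripped = words[i].rstrip('"\')]'); stripped and stripped[-1] in '.!?'
def pvHitA (w : String) : Bool :=
  let stripped := pvRstripTrail w.toList
  !stripped.isEmpty &&
    (match PySem.List.pyGet? stripped (-1) with   -- stripped[-1]
     | some c => decide (c ∈ pvPunct)             -- single-char 'in ".!?"' is membership (exact)
     | none => false)

-- A's loop: for i in range(end-1, start-1, -1): … return i+1 on first hit
def pvGoA (words : List String) : List Int → Option Int
  | [] => none
  | i :: rest =>
      if pvHitA (PySem.List.pyGetD words i "") then some (i + 1) else pvGoA words rest

def find_sentence_boundary_word_idx (words : List String) (start : Int) (end_ : Int) : Option Int :=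
  pvGoA words (PySem.List.pyRange (end_ - 1) (start - 1) (-1))

-- ===== PORT B =====
-- _ends_sentence: scan the word's characters from the right, skip trailing quotes/brackets,
-- decide on the first remaining character
def pvEndsGo : List Char → Bool
  | [] => false
  | c :: rest => if decide (c ∈ pvTrail) then pvEndsGo rest else decide (c ∈ pvPunct)

def pvEndsSentence (w : String) : Bool := pvEndsGo w.toList.reverse

-- forward pass keeping last = the most recent boundary (no early exit)
def find_sentence_boundary_word_idx_alt (words : List String) (start : Int) (end_ : Int) : Option Int :=
  (PySem.List.pyRange start end_ 1).foldl
    (fun last i =>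
      if pvEndsSentence (PySem.List.pyGetD words i "") then some (i + 1) else last)
    none

-- ===== PRECONDITION & SPEC =====
-- Pre_ excludes ranges that contain an index outside [-len(words), len(words)): there Python A either
-- raises IndexError or returns only because a match happens to occur before the bad index is reached,
-- while B's forward scan reaches the bad index and raises.
def Pre_find_sentence_boundary_word_idx (words : List String) (start : Int) (end_ : Int) : Prop :=
  start < end_ → (-(words.length : Int) ≤ start ∧ end_ ≤ (words.length : Int))
instance (words : List String) (start : Int) (end_ : Int) : Decidable (Pre_find_sentence_boundary_word_idx words start end_) := by unfold Pre_find_sentence_boundary_word_idx; infer_instance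

def pvWitness_find_sentence_boundary_word_idx : List String × Int × Int := (["Hi.", "yo"], 0, 2)

def Spec_find_sentence_boundary_word_idx (words : List String) (start : Int) (end_ : Int) (out : Option Int) : Prop := out = find_sentence_boundary_word_idx_alt words start end_
instance (words : List String) (start : Int) (end_ : Int) (out : Option Int) : Decidable (Spec_find_sentence_boundary_word_idx words start end_ out) := by unfold Spec_find_sentence_boundary_word_idx; infer_instance

-- ===== CLAIM (what is proved, stated in full; the proofs are below) =====
def Claim_equal_find_sentence_boundary_word_idx : Prop := ∀ (words : List String) (start : Int) (end_ : Int), Dom_find_sentence_boundary_word_idx words start end_ → Pre_find_sentence_boundary_word_idx words start end_ → Spec_find_sentence_boundary_word_idx words start end_ (find_sentence_boundary_word_idx words start end_)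

-- ===== LEMMAS AND PROOFS =====

-- B's right-to-left character scan computes head-of-dropWhile
theorem pvEndsGo_eq (rs : List Char) :
    pvEndsGo rs = (match rs.dropWhile (fun c => decide (c ∈ pvTrail)) with
                   | [] => false
                   | c :: _ => decide (c ∈ pvPunct)) := by
  induction rs with
  | nil => rfl
  | cons c rest ih =>
      by_cases h : c ∈ pvTrail <;> simp [pvEndsGo, List.dropWhile, h, ih]

-- the two per-word tests agree
theorem pvHitA_eq_pvEndsSentence (w : String) : pvHitA w = pvEndsSentence w := by
  unfold pvHitA pvEndsSentence pvRstripTrail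
  rw [pvEndsGo_eq]
  cases h : w.toList.reverse.dropWhile (fun c => decide (c ∈ pvTrail)) with
  | nil => simp
  | cons c tl =>
      simp only [PySem.List.pyGet?_neg_one, List.getLast?_reverse]
      simp

-- backward first-match over L.reverse = forward fold keeping the last match over L
theorem pvGoA_reverse (words : List String) (L : List Int) :
    pvGoA words L.reverse =
      L.foldl (fun last i =>
        if pvHitA (PySem.List.pyGetD words i "") then some (i + 1) else last) none := by
  induction L using List.reverseRecOn with
  | nil => rfl
  | append_singleton L i ih =>
      rw [List.reverse_append, List.foldl_append]
      simp only [List.reverse_cons, List.reverse_nil, List.nil_append, List.singleton_append,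
        List.foldl_cons, List.foldl_nil, pvGoA]
      by_cases h : pvHitA (PySem.List.pyGetD words i "") = true
      · simp [h]
      · simp only [h, if_neg, Bool.not_eq_true] at *
        simp [ih]

theorem find_sentence_boundary_word_idx_eq (words : List String) (start end_ : Int) :
    find_sentence_boundary_word_idx words start end_ =
      find_sentence_boundary_word_idx_alt words start end_ := by
  unfold find_sentence_boundary_word_idx find_sentence_boundary_word_idx_alt
  have hr : PySem.List.pyRange (end_ - 1) (start - 1) (-1) = (PySem.List.pyRange start end_ 1).reverse := by
    rw [PySem.List.pyRange_neg_one_eq_reverse]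
    norm_num
  rw [hr, pvGoA_reverse]
  simp only [pvHitA_eq_pvEndsSentence]

-- ===== VERDICT (by name: the statement is the Claim_ definition above) =====
theorem find_sentence_boundary_word_idx_spec : Claim_equal_find_sentence_boundary_word_idx := by
  intro words start end_ _ _
  unfold Spec_find_sentence_boundary_word_idx
  exact find_sentence_boundary_word_idx_eq words start end_
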